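-- pv_equiv track=rewrite | github.com/GlennStewart125/AdventOfCode | 2015/11/main.py | contains_pairs
-- ===== SOURCE A (Python) =====
-- def contains_pairs(password: str) -> bool:
--     pairs_count: int = 0
--     previous_char: str = ""
--     for char in password:
--         if char == previous_char:
--             pairs_count += 1
--             previous_char = ""
--         else:
--             previous_char = char
--     return pairs_count >= 2
-- ===== SOURCE B (Python) =====
-- def contains_pairs(password: str) -> bool:
--     # Run-length view: a maximal run of k equal characters contains k // 2
--     # non-overlapping pairs; sum floor(run/2) over all maximal runs.
--     pairs = 0
--     i = 0
--     n = len(password)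
--     while i < n:
--         j = i
--         while j < n and password[j] == password[i]:
--             j += 1
--         pairs += (j - i) // 2
--         i = j
--     return pairs >= 2
-- ===== Notes on version B (the rewrite author's own statement) =====
-- stated objective: alternative
-- what changed: Replaced A's character-by-character state machine (previous-char register reset on each match) by a run-length decomposition: scan to the end of each maximal run of equal characters and add floor(run_length/2) pairs per run arithmetically.
import Mathlib
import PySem

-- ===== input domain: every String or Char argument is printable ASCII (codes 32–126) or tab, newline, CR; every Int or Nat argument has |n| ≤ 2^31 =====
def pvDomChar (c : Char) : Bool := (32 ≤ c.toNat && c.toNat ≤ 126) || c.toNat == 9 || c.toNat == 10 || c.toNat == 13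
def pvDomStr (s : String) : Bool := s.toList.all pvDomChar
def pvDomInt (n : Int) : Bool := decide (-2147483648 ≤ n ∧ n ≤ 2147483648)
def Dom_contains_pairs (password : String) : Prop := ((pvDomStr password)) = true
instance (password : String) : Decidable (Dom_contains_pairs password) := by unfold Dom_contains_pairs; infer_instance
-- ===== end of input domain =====

-- B replaces A's previous-char reset state machine by a run-length decomposition (sum of floor(run/2) over maximal runs); alternative, same cost.


-- ===== PORT A =====
-- the for-loop over the characters, with state (pairs_count, previous_char : String)
def pvLoopA : Int → String → List Char → Int
  | k, _, [] => k
  | k, prev, c :: t =>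
      if String.ofList [c] = prev then pvLoopA (k + 1) "" t
      else pvLoopA k (String.ofList [c]) t

def contains_pairs (password : String) : Bool :=
  decide (pvLoopA 0 "" password.toList ≥ 2)

-- ===== PORT B =====
-- inner while loop of Source B: advance j while j < n and password[j] == password[i] (c = password[i]);
-- fuel = n - j at entry, a structural-recursion guard only (never exhausted on the loop's own runs)
def pvRunEnd (s : List Char) (c : Char) : Nat → Nat → Nat
  | 0, j => j
  | fuel + 1, j =>
      if h : j < s.length then
        if s[j] = c then pvRunEnd s c fuel (j + 1) else j
      else j

-- outer while loop of Source B: state (pairs, i); adds (j - i) // 2 per maximal run;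
-- fuel = n - i at entry, again only a structural-recursion guard
def pvOuterB (s : List Char) : Nat → Int → Nat → Int
  | 0, pairs, _ => pairs
  | fuel + 1, pairs, i =>
      if h : i < s.length then
        let j := pvRunEnd s s[i] (s.length - i) i
        pvOuterB s fuel (pairs + PySem.Int.floordiv ((j : Int) - (i : Int)) 2) j
      else pairs

def contains_pairs_alt (password : String) : Bool :=
  decide (pvOuterB password.toList password.toList.length 0 0 ≥ 2)

-- ===== PRECONDITION & SPEC =====
def Spec_contains_pairs (password : String) (out : Bool) : Prop := out = contains_pairs_alt password
instance (password : String) (out : Bool) : Decidable (Spec_contains_pairs password out) := by unfold Spec_contains_pairs; infer_instance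

-- ===== CLAIM (what is proved, stated in full; the proofs are below) =====
def Claim_equal_contains_pairs : Prop := ∀ (password : String), Dom_contains_pairs password → Spec_contains_pairs password (contains_pairs password)

-- ===== LEMMAS AND PROOFS =====

-- non-overlapping adjacent-pair count, the common reference value of both loops
def pairCount : List Char → Int
  | [] => 0
  | [_] => 0
  | a :: b :: t => if a = b then 1 + pairCount t else pairCount (b :: t)

theorem pvOfList_singleton_inj {c p : Char} (h : String.ofList [c] = String.ofList [p]) : c = p := by
  have := congrArg String.toList h
  simpa [String.toList_ofList] using this

theorem pvLoopA_eq (l : List Char) : ∀ k : Int,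
    pvLoopA k "" l = k + pairCount l ∧
    ∀ p : Char, pvLoopA k (String.ofList [p]) l = k + pairCount (p :: l) := by
  induction l with
  | nil =>
      intro k
      exact ⟨by simp [pvLoopA, pairCount], fun p => by simp [pvLoopA, pairCount]⟩
  | cons c t ih =>
      intro k
      refine ⟨?_, ?_⟩
      · have h : ¬ String.ofList [c] = "" := by simp
        rw [show pvLoopA k "" (c :: t) = pvLoopA k (String.ofList [c]) t from by
          rw [pvLoopA]; simp [h]]
        exact (ih k).2 c
      · intro p
        by_cases hcp : p = c
        · subst hcp
          rw [show pvLoopA k (String.ofList [p]) (p :: t) = pvLoopA (k + 1) "" t from by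
            rw [pvLoopA]; simp]
          rw [(ih (k + 1)).1]
          simp [pairCount]
          ring
        · have h : ¬ String.ofList [c] = String.ofList [p] :=
            fun hh => hcp (pvOfList_singleton_inj hh).symm
          rw [show pvLoopA k (String.ofList [p]) (c :: t) = pvLoopA k (String.ofList [c]) t from by
            rw [pvLoopA]; simp [h]]
          rw [(ih k).2 c]
          simp [pairCount, hcp]

-- splitting the pair count at the first maximal run
theorem pairCount_run (c : Char) : ∀ u : List Char,
    pairCount u = ((u.takeWhile (· == c)).length / 2 : Nat) + pairCount (u.dropWhile (· == c)) := by
  intro u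
  generalize hn : u.length = n
  induction n using Nat.strongRecOn generalizing u with
  | _ n ih =>
      match u with
      | [] => simp [pairCount]
      | [a] =>
          by_cases hac : a = c
          · subst hac
            simp [pairCount, List.takeWhile, List.dropWhile]
          · have h1 : (a == c) = false := beq_eq_false_iff_ne.mpr hac
            simp [pairCount, List.takeWhile, List.dropWhile, h1]
      | a :: b :: t =>
          by_cases hac : a = c
          · subst hac
            by_cases hba : b = a
            · subst hba
              have ht := ih t.length (by simp at hn; omega) t rfl
              simp only [pairCount, List.takeWhile, List.dropWhile,
                beq_self_eq_true] at *
              rw [ht]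
              simp only [List.length_cons]
              push_cast
              omega
            · have hab : ¬ a = b := fun hh => hba hh.symm
              have h1 : (b == a) = false := beq_eq_false_iff_ne.mpr hba
              simp [pairCount, hab, List.takeWhile, List.dropWhile, h1]
          · -- a ≠ c: takeWhile is empty and dropWhile leaves u unchanged
            have h1 : (a == c) = false := beq_eq_false_iff_ne.mpr hac
            simp [List.takeWhile, List.dropWhile, h1]

-- the inner loop computes i + the length of the maximal equal run starting at i
theorem pvRunEnd_spec (s : List Char) (c : Char) : ∀ fuel j, s.length - j ≤ fuel →
    pvRunEnd s c fuel j = j + ((s.drop j).takeWhile (· == c)).length := by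
  intro fuel
  induction fuel with
  | zero =>
      intro j hm
      rw [pvRunEnd, List.drop_eq_nil_of_le (by omega)]
      simp
  | succ fuel ih =>
      intro j hm
      rw [pvRunEnd]
      by_cases h : j < s.length
      · rw [dif_pos h, ← List.getElem_cons_drop h]
        by_cases hc : s[j] = c
        · rw [if_pos hc]
          have h1 : (s[j] == c) = true := beq_iff_eq.mpr hc
          rw [ih (j + 1) (by omega)]
          simp [List.takeWhile, h1]
          omega
        · rw [if_neg hc]
          have h1 : (s[j] == c) = false := beq_eq_false_iff_ne.mpr hc
          simp [List.takeWhile, h1]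
      · rw [dif_neg h, List.drop_eq_nil_of_le (by omega)]
        simp

-- the outer loop accumulates exactly the pair count of the remaining suffix
theorem pvOuterB_eq (s : List Char) : ∀ fuel i (pairs : Int), s.length - i ≤ fuel →
    pvOuterB s fuel pairs i = pairs + pairCount (s.drop i) := by
  intro fuel
  induction fuel with
  | zero =>
      intro i pairs hm
      rw [pvOuterB, List.drop_eq_nil_of_le (by omega)]
      simp [pairCount]
  | succ fuel ih =>
      intro i pairs hm
      rw [pvOuterB]
      by_cases h : i < s.length
      · simp only [dif_pos h]
        have hj := pvRunEnd_spec s s[i] (s.length - i) i (by omega)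
        set L := ((s.drop i).takeWhile (· == s[i])).length with hL
        have hLpos : 1 ≤ L := by
          rw [hL, ← List.getElem_cons_drop h]
          simp [List.takeWhile]
        have hdrop : s.drop (pvRunEnd s s[i] (s.length - i) i)
            = (s.drop i).dropWhile (· == s[i]) := by
          rw [hj, ← List.drop_drop]
          conv_lhs => rw [show s.drop i
            = (s.drop i).takeWhile (· == s[i]) ++ (s.drop i).dropWhile (· == s[i]) from
              (List.takeWhile_append_dropWhile).symm]
          exact List.drop_left' hL.symm
        rw [ih (pvRunEnd s s[i] (s.length - i) i) _ (by omega), hdrop]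
        have hfd : PySem.Int.floordiv ((pvRunEnd s s[i] (s.length - i) i : Int) - (i : Int)) 2
            = ((L / 2 : Nat) : Int) := by
          rw [show ((pvRunEnd s s[i] (s.length - i) i : Int) - (i : Int)) = ((L : Nat) : Int) from by
            rw [hj]; push_cast; ring]
          exact_mod_cast PySem.Int.floordiv_natCast L 2
        rw [hfd, pairCount_run s[i] (s.drop i), ← hL]
        ring
      · rw [dif_neg h, List.drop_eq_nil_of_le (by omega)]
        simp [pairCount]

-- ===== VERDICT (by name: the statement is the Claim_ definition above) =====
theorem contains_pairs_spec : Claim_equal_contains_pairs := by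
  intro password _
  unfold Spec_contains_pairs contains_pairs contains_pairs_alt
  rw [(pvLoopA_eq password.toList 0).1,
      pvOuterB_eq password.toList password.toList.length 0 0 (by omega)]
  simp
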